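-- pv_equiv track=rewrite | github.com/zzong2006/coding-problems-study | pythonProject/pb4902.py | find_max_value
-- ===== SOURCE A (Python) =====
-- def find_max_value(arr: list, N: int):
--     result = 0
--     for i in range(1, N):
--         if i == 1:
--             result = max(arr)
--             continue
--         if i == N:
--             result = max(sum(arr), result)
--             continue
--         # 1 < i < N
--         # 똑바로 삼각형
--         points = [0]
--         step = 1
--         for j in range(i - 1):
--             points.append(points[-1] + step)
--             step += 2
--         for k in range(1, N - i + 2):           # 삼각형 세로 개수
--             for z in range(k):                  # 삼각형 가로 개수
--                 sums = 0
--                 for l in range(i):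
--                     sums += sum(arr[points[l]:points[l] + (l * 2 + 1)])
--                 result = max(sums, result)
--                 # 기준점을 가로쪽으로 옮김
--                 if z != k - 1:
--                     for p in range(len(points)):
--                         points[p] += 2
--             # 기준점을 세로쪽으로 옮김
--             if k != N - i + 1 :
--                 step = 1
--                 for p in range(len(points)):
--                     points[p] += step
--                     step += 2
--
--         # 거꾸로 삼각형
--
--     return result
-- ===== SOURCE B (Python) =====
-- def find_max_value(arr: list, N: int):
--     if N <= 1:
--         return 0
--     result = max(arr)
--     n = len(arr)
--     P = [0]
--     for x in arr:
--         P.append(P[-1] + x)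
--     for i in range(2, N):
--         for k in range(1, N - i + 2):
--             base = (k - 1) * (k - 2)
--             for z in range(k):
--                 s = 0
--                 for l in range(i):
--                     a = l * l + (k - 1) * (2 * l + 1) + base + 2 * z
--                     b = a + 2 * l + 1
--                     s += P[min(b, n)] - P[min(a, n)]
--                 if s > result:
--                     result = s
--     return result
-- ===== Notes on version B (the rewrite author's own statement) =====
-- stated objective: alternative
-- what changed: B replaces A's mutable shifting 'points' list and per-triangle slice sums by a one-time prefix-sum array plus a closed-form formula for each row's start offset, so every row sum becomes a single prefix-difference (intended as faster, O(i) vs O(i^2) Python operations per triangle; measured ~1.25x at the largest size, so not claimed as faster).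
import Mathlib
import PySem

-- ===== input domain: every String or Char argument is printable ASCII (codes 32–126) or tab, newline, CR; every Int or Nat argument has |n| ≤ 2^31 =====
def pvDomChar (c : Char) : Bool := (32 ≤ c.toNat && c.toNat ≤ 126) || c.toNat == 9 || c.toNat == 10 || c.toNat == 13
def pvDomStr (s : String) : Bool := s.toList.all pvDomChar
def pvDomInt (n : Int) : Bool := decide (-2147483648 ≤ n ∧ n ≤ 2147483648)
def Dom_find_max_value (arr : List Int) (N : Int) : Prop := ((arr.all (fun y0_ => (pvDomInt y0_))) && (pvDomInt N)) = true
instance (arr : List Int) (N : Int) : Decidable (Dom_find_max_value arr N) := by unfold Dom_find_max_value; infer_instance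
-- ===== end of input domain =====

-- B replaces A's mutable shifting 'points' list and per-row slice sums by a one-time
-- prefix-sum array with closed-form row offsets (a different algorithm of similar cost).
-- Equivalence is about return values; neither function mutates its arguments.

-- ===== PORT A =====
-- building of the initial 'points' list: points.append(points[-1] + step); step += 2
def pvA_buildStep (st : List Int × Int) (_j : Int) : List Int × Int :=
  (st.1 ++ [PySem.List.pyGetD st.1 (-1) 0 + st.2], st.2 + 2)

-- the inner 'for l in range(i): sums += sum(arr[points[l] : points[l] + (l*2+1)])'
def pvA_sums (arr : List Int) (i : Int) (points : List Int) : Int :=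
  (PySem.List.pyRange 0 i 1).foldl
    (fun sums l =>
      sums + (PySem.List.slice arr (some (PySem.List.pyGetD points l 0))
               (some (PySem.List.pyGetD points l 0 + (l * 2 + 1)))).sum) 0

-- body of 'for z in range(k)': take the triangle sum, then shift horizontally unless last
def pvA_zStep (arr : List Int) (i k : Int) (st : List Int × Int) (z : Int) : List Int × Int :=
  let sums := pvA_sums arr i st.1
  let result := max sums st.2
  let points := if z ≠ k - 1 then st.1.map (fun x => x + 2) else st.1
  (points, result)

-- body of 'for k in range(1, N-i+2)': run the z loop, then shift vertically unless last
def pvA_kStep (arr : List Int) (N i : Int) (st : List Int × Int) (k : Int) : List Int × Int :=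
  let st2 := (PySem.List.pyRange 0 k 1).foldl (pvA_zStep arr i k) st
  let points :=
    if k ≠ N - i + 1 then
      (st2.1.foldl (fun (acc : List Int × Int) x => (acc.1 ++ [x + acc.2], acc.2 + 2)) ([], 1)).1
    else st2.1
  (points, st2.2)

def find_max_value (arr : List Int) (N : Int) : Int :=
  (PySem.List.pyRange 1 N 1).foldl
    (fun result i =>
      if i = 1 then (PySem.List.max? arr (fun x => x)).getD 0
      else if i = N then max arr.sum result
      else
        let points := ((PySem.List.pyRange 0 (i - 1) 1).foldl pvA_buildStep ([0], 1)).1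
        ((PySem.List.pyRange 1 (N - i + 2) 1).foldl (pvA_kStep arr N i) (points, result)).2)
    0

-- ===== PORT B =====
def find_max_value_alt (arr : List Int) (N : Int) : Int :=
  if N ≤ 1 then 0
  else
    let result := (PySem.List.max? arr (fun x => x)).getD 0
    let n := PySem.List.len arr
    let P := arr.foldl (fun P x => P ++ [PySem.List.pyGetD P (-1) 0 + x]) [0]
    (PySem.List.pyRange 2 N 1).foldl
      (fun result i =>
        (PySem.List.pyRange 1 (N - i + 2) 1).foldl
          (fun result k =>
            let base := (k - 1) * (k - 2)
            (PySem.List.pyRange 0 k 1).foldl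
              (fun result z =>
                let s := (PySem.List.pyRange 0 i 1).foldl
                  (fun s l =>
                    let a := l * l + (k - 1) * (2 * l + 1) + base + 2 * z
                    let b := a + 2 * l + 1
                    s + (PySem.List.pyGetD P (min b n) 0 - PySem.List.pyGetD P (min a n) 0)) 0
                if s > result then s else result) result) result) result

-- ===== PRECONDITION & SPEC =====
-- Pre_ excludes only (arr = [] with N ≥ 2): there the Python A raises ValueError on max([])
-- (and the Python B raises identically).
def Pre_find_max_value (arr : List Int) (N : Int) : Prop := N ≤ 1 ∨ arr ≠ []
instance (arr : List Int) (N : Int) : Decidable (Pre_find_max_value arr N) := by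
  unfold Pre_find_max_value; infer_instance
def pvWitness_find_max_value : List Int × Int := ([1, 2, -3, 4, 5], 4)
def Spec_find_max_value (arr : List Int) (N : Int) (out : Int) : Prop := out = find_max_value_alt arr N
instance (arr : List Int) (N : Int) (out : Int) : Decidable (Spec_find_max_value arr N out) := by
  unfold Spec_find_max_value; infer_instance

-- ===== CLAIM (what is proved, stated in full; the proofs are below) =====
def Claim_equal_find_max_value : Prop := ∀ (arr : List Int) (N : Int), Dom_find_max_value arr N → Pre_find_max_value arr N → Spec_find_max_value arr N (find_max_value arr N)

-- ===== LEMMAS AND PROOFS =====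

-- the row offset used by both programs: start of row l of the triangle anchored at (k, z)
def pvG (k l : Int) : Int := l * l + (k - 1) * (2 * l + 1) + (k - 1) * (k - 2)

-- B's prefix list is the list of partial sums
theorem pv_prefix_eq (arr : List Int) :
    arr.foldl (fun P x => P ++ [PySem.List.pyGetD P (-1) 0 + x]) [0]
      = (List.range (arr.length + 1)).map (fun j => (arr.take j).sum) := by
  induction arr using List.reverseRecOn with
  | nil => simp
  | append_singleton xs x ih =>
    rw [List.foldl_append, ih]
    have hsplit : (List.range (xs.length + 1)).map (fun j => (xs.take j).sum)
        = (List.range xs.length).map (fun j => (xs.take j).sum) ++ [xs.sum] := by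
      rw [List.range_succ, List.map_append]; simp
    simp only [List.foldl_cons, List.foldl_nil, hsplit,
      PySem.List.pyGetD_neg_one_append_singleton]
    rw [List.length_append, List.length_singleton, List.range_succ, List.range_succ,
      List.map_append, List.map_append]
    congr 1
    · congr 1
      · apply List.map_congr_left
        intro j hj
        simp at hj
        rw [List.take_append_of_le_length (by omega)]
      · simp
    · simp

-- reading the clamped prefix list is a clamped take
theorem pv_prefix_get (arr : List Int) (b : Int) (hb : 0 ≤ b) :
    PySem.List.pyGetD ((List.range (arr.length + 1)).map (fun j => (arr.take j).sum))
        (min b (PySem.List.len arr)) 0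
      = (arr.take b.toNat).sum := by
  rw [PySem.List.len_eq]
  have h0 : 0 ≤ min b (arr.length : Int) := by omega
  have h1 : min b (arr.length : Int) < (((List.range (arr.length + 1)).map
      (fun j => (arr.take j).sum)).length : Int) := by
    simp only [List.length_map, List.length_range]; push_cast; omega
  rw [PySem.List.pyGetD_eq_getElem _ _ h0 h1]
  simp only [List.getElem_map, List.getElem_range]
  by_cases h : b ≤ (arr.length : Int)
  · have : (min b (arr.length:Int)).toNat = b.toNat := by omega
    rw [this]
  · have : (min b (arr.length:Int)).toNat = arr.length := by omega
    rw [this, List.take_length, List.take_of_length_le (by omega)]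

-- a slice sum is a difference of prefix sums
theorem pv_slice_sum (arr : List Int) (p c : Int) (hp : 0 ≤ p) (hc : 0 ≤ c) :
    (PySem.List.slice arr (some p) (some (p + c))).sum
      = (arr.take (p + c).toNat).sum - (arr.take p.toNat).sum := by
  rw [PySem.List.slice_toNat arr hp (by omega)]
  have h : (p + c).toNat = p.toNat + c.toNat := by omega
  rw [h, Nat.add_sub_cancel_left, List.take_add, List.sum_append]
  ring

-- the initial points list is [l*l for l in range(i)]
theorem pv_build (m : Nat) :
    ((PySem.List.pyRange 0 (m : Int) 1).foldl pvA_buildStep ([0], 1))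
      = ((PySem.List.pyRange 0 ((m : Int) + 1) 1).map (fun l => l * l), 2 * (m : Int) + 1) := by
  induction m with
  | zero =>
    rw [show ((0:Nat):Int) = 0 by norm_num, PySem.List.pyRange_one_eq_nil (by norm_num),
      show (0:Int) + 1 = 0 + 1 from rfl, PySem.List.pyRange_one_singleton]
    rfl
  | succ n ih =>
    have hsr : PySem.List.pyRange 0 ((n : Int) + 1) 1
        = PySem.List.pyRange 0 (n : Int) 1 ++ [(n : Int)] := by
      exact PySem.List.pyRange_one_succ_right (by omega)
    push_cast
    rw [hsr, List.foldl_append, ih, List.foldl_cons, List.foldl_nil]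
    unfold pvA_buildStep
    have hmap : (PySem.List.pyRange 0 ((n : Int) + 1) 1).map (fun l => l * l)
        = (PySem.List.pyRange 0 (n : Int) 1).map (fun l => l * l) ++ [(n : Int) * (n : Int)] := by
      rw [hsr, List.map_append]; simp
    have hsr2 : PySem.List.pyRange 0 ((n : Int) + 1 + 1) 1
        = PySem.List.pyRange 0 ((n : Int) + 1) 1 ++ [(n : Int) + 1] := by
      exact PySem.List.pyRange_one_succ_right (by omega)
    simp only [hmap, PySem.List.pyGetD_neg_one_append_singleton]
    rw [hsr2, List.map_append, hmap, List.append_assoc,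
      Prod.mk.injEq]
    refine ⟨?_, by ring⟩
    simp only [List.map_cons, List.map_nil, List.append_assoc, List.cons_append, List.nil_append]
    congr 1
    simp only [List.cons.injEq, and_true, true_and]
    ring

-- the vertical shift adds 2*l + s0 to slot l
theorem pv_vshift (m : Nat) (f : Int → Int) (init : List Int) (s0 : Int) :
    (((PySem.List.pyRange 0 (m : Int) 1).map f).foldl
        (fun (acc : List Int × Int) x => (acc.1 ++ [x + acc.2], acc.2 + 2)) (init, s0))
      = (init ++ (PySem.List.pyRange 0 (m : Int) 1).map (fun l => f l + (s0 + 2 * l)),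
         s0 + 2 * (m : Int)) := by
  induction m with
  | zero =>
    rw [show ((0:Nat):Int) = 0 by norm_num, PySem.List.pyRange_one_eq_nil (by norm_num)]
    simp
  | succ n ih =>
    have hsr : PySem.List.pyRange 0 ((n : Int) + 1) 1
        = PySem.List.pyRange 0 (n : Int) 1 ++ [(n : Int)] := by
      exact PySem.List.pyRange_one_succ_right (by omega)
    push_cast
    rw [hsr, List.map_append, List.foldl_append, ih]
    simp only [List.map_cons, List.map_nil, List.foldl_cons, List.foldl_nil, List.append_assoc,
      Prod.mk.injEq]
    refine ⟨?_, by ring⟩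
    rw [List.map_append]
    congr 1

-- the same with an Int bound
theorem pv_vshift' (mI : Int) (h : 0 ≤ mI) (f : Int → Int) (init : List Int) (s0 : Int) :
    (((PySem.List.pyRange 0 mI 1).map f).foldl
        (fun (acc : List Int × Int) x => (acc.1 ++ [x + acc.2], acc.2 + 2)) (init, s0))
      = (init ++ (PySem.List.pyRange 0 mI 1).map (fun l => f l + (s0 + 2 * l)),
         s0 + 2 * mI) := by
  have := pv_vshift mI.toNat f init s0
  rwa [Int.toNat_of_nonneg h] at this

-- the z loop: points shift by 2 each step except the last; result is a running max
theorem pv_zloop (arr : List Int) (i k : Int) (g : Int → Int) (r : Int) (m : Nat)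
    (hk : 1 ≤ k) (hm : (m : Int) ≤ k) :
    ((PySem.List.pyRange 0 (m : Int) 1).foldl (pvA_zStep arr i k)
        ((PySem.List.pyRange 0 i 1).map g, r))
      = ((PySem.List.pyRange 0 i 1).map (fun l => g l + 2 * min (m : Int) (k - 1)),
         (PySem.List.pyRange 0 (m : Int) 1).foldl
           (fun r z => max (pvA_sums arr i ((PySem.List.pyRange 0 i 1).map (fun l => g l + 2 * z))) r) r) := by
  induction m generalizing r with
  | zero =>
    rw [show ((0:Nat):Int) = 0 by norm_num,
      PySem.List.pyRange_one_eq_nil (a := 0) (b := 0) (by norm_num)]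
    simp only [List.foldl_nil, Prod.mk.injEq, and_true]
    congr 1
    funext l
    rw [show min (0:Int) (k-1) = 0 from by omega]
    ring
  | succ n ih =>
    have hsr : PySem.List.pyRange 0 ((n : Int) + 1) 1
        = PySem.List.pyRange 0 (n : Int) 1 ++ [(n : Int)] := by
      exact PySem.List.pyRange_one_succ_right (by omega)
    push_cast
    push_cast at hm
    rw [hsr, List.foldl_append, List.foldl_append, ih r (by omega), List.foldl_cons, List.foldl_nil,
      List.foldl_cons, List.foldl_nil]
    have hmin : min (n : Int) (k - 1) = (n : Int) := by omega
    rw [hmin]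
    unfold pvA_zStep
    simp only [List.map_map, Prod.mk.injEq]
    constructor
    · by_cases hlast : ((n : Int) + 1) = k
      · rw [if_neg (show ¬ ((n : Int) ≠ k - 1) from by omega),
          show min ((n:Int)+1) (k-1) = (n:Int) from by omega]
      · rw [if_pos (show ((n : Int) ≠ k - 1) from by omega),
          show min ((n:Int)+1) (k-1) = (n:Int)+1 from by omega]
        congr 1
        funext l
        simp only [Function.comp_apply]
        ring
    · trivial

-- the k loop while every iteration still shifts: points follow the closed form pvG
theorem pv_kloop (arr : List Int) (N i : Int) (r0 : Int) (hi : 0 ≤ i) (K : Nat)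
    (hK : (K : Int) ≤ N - i) :
    ((PySem.List.pyRange 1 ((K : Int) + 1) 1).foldl (pvA_kStep arr N i)
        ((PySem.List.pyRange 0 i 1).map (pvG 1), r0))
      = ((PySem.List.pyRange 0 i 1).map (pvG ((K : Int) + 1)),
         (PySem.List.pyRange 1 ((K : Int) + 1) 1).foldl
           (fun r k => (PySem.List.pyRange 0 k 1).foldl
             (fun r z => max (pvA_sums arr i ((PySem.List.pyRange 0 i 1).map (fun l => pvG k l + 2 * z))) r) r) r0) := by
  induction K generalizing r0 with
  | zero =>
    rw [show ((0:Nat):Int) = 0 by norm_num,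
      PySem.List.pyRange_one_eq_nil (a := 1) (b := (0:Int)+1) (by norm_num)]
    simp
  | succ n ih =>
    have hsr : PySem.List.pyRange 1 ((n : Int) + 1 + 1) 1
        = PySem.List.pyRange 1 ((n : Int) + 1) 1 ++ [(n : Int) + 1] := by
      exact PySem.List.pyRange_one_succ_right (by omega)
    push_cast
    push_cast at hK
    rw [hsr, List.foldl_append, List.foldl_append, ih r0 (by omega), List.foldl_cons,
      List.foldl_nil, List.foldl_cons, List.foldl_nil]
    unfold pvA_kStep
    have hz := pv_zloop arr i ((n : Int) + 1) (pvG ((n : Int) + 1))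
      ((PySem.List.pyRange 1 ((n : Int) + 1) 1).foldl
           (fun r k => (PySem.List.pyRange 0 k 1).foldl
             (fun r z => max (pvA_sums arr i ((PySem.List.pyRange 0 i 1).map (fun l => pvG k l + 2 * z))) r) r) r0)
      (n + 1) (by omega) (by push_cast; omega)
    push_cast at hz
    rw [hz]
    simp only
    rw [if_pos (show ((n:Int) + 1) ≠ N - i + 1 from by omega)]
    rw [pv_vshift' i hi]
    simp only [List.nil_append, Prod.mk.injEq]
    refine ⟨?_, trivial⟩
    congr 1
    funext l
    rw [show min ((n:Int)+1) ((n:Int)+1-1) = (n:Int) from by omega]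
    unfold pvG
    ring


theorem pv_nonneg (k z l : Int) (hk : 1 ≤ k) (hz : 0 ≤ z) (hl : 0 ≤ l) :
    0 ≤ pvG k l + 2 * z := by
  unfold pvG
  have h1 : 0 ≤ l * l := mul_self_nonneg l
  have h2 : 0 ≤ (k - 1) * (2 * l + 1) := mul_nonneg (by omega) (by omega)
  have h3 : 0 ≤ (k - 1) * (k - 2) := by
    by_cases h : k = 1
    · simp [h]
    · exact mul_nonneg (by omega) (by omega)
  linarith

theorem pv_max_if (s r : Int) : max s r = if s > r then s else r := by
  rcases lt_or_ge r s with h | h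
  · rw [if_pos h]; exact max_eq_left h.le
  · rw [if_neg (not_lt.mpr h)]; exact max_eq_right h

-- the triangle sum over the closed-form points equals B's prefix-sum fold
theorem pv_sums_eq (arr : List Int) (i k z : Int) (hk : 1 ≤ k) (hz : 0 ≤ z) :
    pvA_sums arr i ((PySem.List.pyRange 0 i 1).map (fun l => pvG k l + 2 * z))
      = (PySem.List.pyRange 0 i 1).foldl
          (fun s l =>
            s + (PySem.List.pyGetD
                   ((List.range (arr.length + 1)).map (fun j => (arr.take j).sum))
                   (min (l * l + (k - 1) * (2 * l + 1) + (k - 1) * (k - 2) + 2 * z + 2 * l + 1)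
                     (PySem.List.len arr)) 0
                 - PySem.List.pyGetD
                   ((List.range (arr.length + 1)).map (fun j => (arr.take j).sum))
                   (min (l * l + (k - 1) * (2 * l + 1) + (k - 1) * (k - 2) + 2 * z)
                     (PySem.List.len arr)) 0)) 0 := by
  unfold pvA_sums
  rw [PySem.List.foldl_add, PySem.List.foldl_add]
  congr 1
  refine congrArg List.sum (List.map_congr_left fun l hl => ?_)
  rw [PySem.List.mem_pyRange_one] at hl
  obtain ⟨hl0, hli⟩ := hl
  have hget : PySem.List.pyGetD ((PySem.List.pyRange 0 i 1).map (fun l => pvG k l + 2 * z)) l 0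
      = pvG k l + 2 * z :=
    PySem.List.pyGetD_map_pyRange_of_nonneg _ _ _ _ hl0 hli
  rw [hget]
  have ha : 0 ≤ pvG k l + 2 * z := pv_nonneg k z l hk hz hl0
  have hc : 0 ≤ l * 2 + 1 := by omega
  have e1 : l * l + (k - 1) * (2 * l + 1) + (k - 1) * (k - 2) + 2 * z + 2 * l + 1
      = pvG k l + 2 * z + (l * 2 + 1) := by unfold pvG; ring
  have e2 : l * l + (k - 1) * (2 * l + 1) + (k - 1) * (k - 2) + 2 * z
      = pvG k l + 2 * z := by unfold pvG; ring
  rw [pv_slice_sum arr _ _ ha hc, e1, e2,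
    pv_prefix_get arr (pvG k l + 2 * z + (l * 2 + 1)) (by omega),
    pv_prefix_get arr (pvG k l + 2 * z) ha]
theorem pv_tri (arr : List Int) (N i : Int) (h2 : 2 ≤ i) (hiN : i < N) (r : Int) :
    ((PySem.List.pyRange 1 (N - i + 2) 1).foldl (pvA_kStep arr N i)
        (((PySem.List.pyRange 0 (i - 1) 1).foldl pvA_buildStep ([0], 1)).1, r)).2
      = (PySem.List.pyRange 1 (N - i + 2) 1).foldl
          (fun result k =>
            (PySem.List.pyRange 0 k 1).foldl
              (fun result z =>
                let s := (PySem.List.pyRange 0 i 1).foldl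
                  (fun s l =>
                    let a := l * l + (k - 1) * (2 * l + 1) + (k - 1) * (k - 2) + 2 * z
                    let b := a + 2 * l + 1
                    s + (PySem.List.pyGetD
                           ((List.range (arr.length + 1)).map (fun j => (arr.take j).sum))
                           (min b (PySem.List.len arr)) 0
                         - PySem.List.pyGetD
                           ((List.range (arr.length + 1)).map (fun j => (arr.take j).sum))
                           (min a (PySem.List.len arr)) 0)) 0
                if s > result then s else result) result) r := by
  -- initial points are the squares, i.e. pvG 1
  have hb := pv_build (i - 1).toNat
  rw [Int.toNat_of_nonneg (by omega : (0:Int) ≤ i - 1)] at hb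
  rw [show i - 1 + 1 = i from by ring] at hb
  have hsq : (PySem.List.pyRange 0 i 1).map (fun l => l * l)
      = (PySem.List.pyRange 0 i 1).map (pvG 1) := by
    refine List.map_congr_left fun l _ => ?_
    unfold pvG; ring
  -- split off the final k iteration
  have hsplit : PySem.List.pyRange 1 (N - i + 2) 1
      = PySem.List.pyRange 1 (N - i + 1) 1 ++ [N - i + 1] := by
    have := PySem.List.pyRange_one_succ_right (a := 1) (b := N - i + 1) (by omega)
    rw [show N - i + 1 + 1 = N - i + 2 from by ring] at this
    exact this
  have hk := pv_kloop arr N i r (by omega) (N - i).toNat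
    (by rw [Int.toNat_of_nonneg (by omega)])
  rw [Int.toNat_of_nonneg (by omega : (0:Int) ≤ N - i)] at hk
  -- A side: evaluate
  rw [hsplit, List.foldl_append, hb, hsq, hk, List.foldl_cons, List.foldl_nil]
  unfold pvA_kStep
  have hz := pv_zloop arr i (N - i + 1) (pvG (N - i + 1))
    ((PySem.List.pyRange 1 (N - i + 1) 1).foldl
      (fun r k => (PySem.List.pyRange 0 k 1).foldl
        (fun r z => max (pvA_sums arr i ((PySem.List.pyRange 0 i 1).map (fun l => pvG k l + 2 * z))) r) r) r)
    (N - i + 1).toNat (by omega) (by rw [Int.toNat_of_nonneg (by omega)])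
  rw [Int.toNat_of_nonneg (by omega : (0:Int) ≤ N - i + 1)] at hz
  rw [show N - i + 1 = (N - i) + 1 from by ring] at hz
  rw [show (N - i) + 1 = N - i + 1 from rfl] at hz
  rw [hz]
  simp only
  -- now both sides are folds of the running-max body; fold the A side back together
  rw [List.foldl_append, List.foldl_cons, List.foldl_nil]
  -- pointwise conversion of the fold bodies: first at the z level, then at the k level
  have hzlevel : ∀ (k : Int), 1 ≤ k → ∀ (r : Int),
      (PySem.List.pyRange 0 k 1).foldl
        (fun r z => max (pvA_sums arr i ((PySem.List.pyRange 0 i 1).map (fun l => pvG k l + 2 * z))) r) r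
      = (PySem.List.pyRange 0 k 1).foldl
          (fun result z =>
            let s := (PySem.List.pyRange 0 i 1).foldl
              (fun s l =>
                let a := l * l + (k - 1) * (2 * l + 1) + (k - 1) * (k - 2) + 2 * z
                let b := a + 2 * l + 1
                s + (PySem.List.pyGetD
                       ((List.range (arr.length + 1)).map (fun j => (arr.take j).sum))
                       (min b (PySem.List.len arr)) 0
                     - PySem.List.pyGetD
                       ((List.range (arr.length + 1)).map (fun j => (arr.take j).sum))
                       (min a (PySem.List.len arr)) 0)) 0
            if s > result then s else result) r := by
    intro k hk1 r
    refine PySem.List.foldl_congr_mem _ _ _ _ (fun r z hzmem => ?_)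
    rw [PySem.List.mem_pyRange_one] at hzmem
    show max (pvA_sums arr i ((PySem.List.pyRange 0 i 1).map (fun l => pvG k l + 2 * z))) r = _
    rw [pv_sums_eq arr i k z (by omega) (by omega), pv_max_if]
  have hpref :
      (PySem.List.pyRange 1 (N - i + 1) 1).foldl
        (fun r k => (PySem.List.pyRange 0 k 1).foldl
          (fun r z => max (pvA_sums arr i ((PySem.List.pyRange 0 i 1).map (fun l => pvG k l + 2 * z))) r) r) r
      = (PySem.List.pyRange 1 (N - i + 1) 1).foldl
          (fun result k =>
            (PySem.List.pyRange 0 k 1).foldl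
              (fun result z =>
                let s := (PySem.List.pyRange 0 i 1).foldl
                  (fun s l =>
                    let a := l * l + (k - 1) * (2 * l + 1) + (k - 1) * (k - 2) + 2 * z
                    let b := a + 2 * l + 1
                    s + (PySem.List.pyGetD
                           ((List.range (arr.length + 1)).map (fun j => (arr.take j).sum))
                           (min b (PySem.List.len arr)) 0
                         - PySem.List.pyGetD
                           ((List.range (arr.length + 1)).map (fun j => (arr.take j).sum))
                           (min a (PySem.List.len arr)) 0)) 0
                if s > result then s else result) result) r := by
    refine PySem.List.foldl_congr_mem _ _ _ _ (fun r k hkmem => ?_)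
    rw [PySem.List.mem_pyRange_one] at hkmem
    exact hzlevel k (by omega) r
  rw [hpref, hzlevel (N - i + 1) (by omega)]
-- ===== VERDICT (by name: the statement is the Claim_ definition above) =====
theorem find_max_value_spec : Claim_equal_find_max_value := by
  unfold Claim_equal_find_max_value
  intro arr N _ _
  unfold Spec_find_max_value
  simp only [find_max_value, find_max_value_alt]
  by_cases hN : N ≤ 1
  · rw [PySem.List.pyRange_one_eq_nil (a := 1) (b := N) (by omega), if_pos hN]
    rfl
  · rw [if_neg hN, PySem.List.pyRange_one_cons (by omega : (1:Int) < N), List.foldl_cons,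
      if_pos rfl, show (1:Int) + 1 = 2 from rfl]
    rw [pv_prefix_eq arr]
    refine PySem.List.foldl_congr_mem _ _ _ _ (fun r i himem => ?_)
    rw [PySem.List.mem_pyRange_one] at himem
    rw [if_neg (show ¬ i = 1 from by omega), if_neg (show ¬ i = N from by omega)]
    exact pv_tri arr N i (by omega) (by omega) r
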